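-- pv_equiv track=rewrite | github.com/Lavender-Team/Harmonize-recsys | content_based_filtering.py | classify_gender
-- ===== SOURCE A (Python) =====
-- def classify_gender(gender_list):
--     # 'OTHER'이 하나라도 있으면 '기타'
--     if 'OTHER' in gender_list:
--         return '기타'
--
--     # 'FEMALE'과 'MALE'이 섞여 있으면 '혼성'
--     if 'FEMALE' in gender_list and 'MALE' in gender_list:
--         return '혼성'
--
--     # 'FEMALE'만 있으면 '여성'
--     if all(g == 'FEMALE' for g in gender_list):
--         return '여성'
--
--     # 'MALE'만 있으면 '남성'
--     if all(g == 'MALE' for g in gender_list):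
--         return '남성'
--
--     # 예외 처리를 위해 기본 반환값 (조건에 맞지 않는 경우)
--     return '기타'
-- ===== SOURCE B (Python) =====
-- def classify_gender(gender_list):
--     # One pass collecting four flags, then a flag-based dispatch.
--     has_other = has_female = has_male = has_unknown = False
--     for g in gender_list:
--         if g == 'OTHER':
--             has_other = True
--         elif g == 'FEMALE':
--             has_female = True
--         elif g == 'MALE':
--             has_male = True
--         else:
--             has_unknown = True
--     if has_other:
--         return '기타'
--     if has_female and has_male:
--         return '혼성'
--     if not has_male and not has_unknown:
--         return '여성'
--     if not has_female and not has_unknown: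
--         return '남성'
--     return '기타'
-- ===== Notes on version B (the rewrite author's own statement) =====
-- stated objective: alternative
-- what changed: Replaces A's four separate scans (two membership tests and two all() passes) with a single pass accumulating four boolean flags followed by a flag-based dispatch; same O(n) cost (A's scans run in C, so no measured speedup).
import Mathlib
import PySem

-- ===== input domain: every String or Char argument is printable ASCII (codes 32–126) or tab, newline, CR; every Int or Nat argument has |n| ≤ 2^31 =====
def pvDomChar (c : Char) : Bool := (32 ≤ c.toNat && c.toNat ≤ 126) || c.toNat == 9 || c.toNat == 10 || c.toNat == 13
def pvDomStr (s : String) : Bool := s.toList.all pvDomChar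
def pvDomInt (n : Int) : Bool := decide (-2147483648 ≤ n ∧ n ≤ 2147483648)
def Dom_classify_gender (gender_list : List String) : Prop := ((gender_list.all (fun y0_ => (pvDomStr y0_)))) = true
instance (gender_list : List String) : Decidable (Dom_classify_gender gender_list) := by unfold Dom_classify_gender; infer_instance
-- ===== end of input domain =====

-- B replaces A's four separate scans with one flag-collecting pass and a flag dispatch (alternative decomposition, same cost).


-- ===== PORT A =====
def classify_gender (gender_list : List String) : String :=
  if gender_list.contains "OTHER" then "기타"
  else if gender_list.contains "FEMALE" && gender_list.contains "MALE" then "혼성"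
  else if gender_list.all (fun g => g == "FEMALE") then "여성"
  else if gender_list.all (fun g => g == "MALE") then "남성"
  else "기타"

-- ===== PORT B =====
-- the single pass of Source B: accumulate (has_other, has_female, has_male, has_unknown)
def cgFlags (gender_list : List String) : Bool × Bool × Bool × Bool :=
  gender_list.foldl
    (fun (f : Bool × Bool × Bool × Bool) g =>
      if g == "OTHER" then (true, f.2.1, f.2.2.1, f.2.2.2)
      else if g == "FEMALE" then (f.1, true, f.2.2.1, f.2.2.2)
      else if g == "MALE" then (f.1, f.2.1, true, f.2.2.2)
      else (f.1, f.2.1, f.2.2.1, true))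
    (false, false, false, false)

def classify_gender_alt (gender_list : List String) : String :=
  let f := cgFlags gender_list
  if f.1 then "기타"
  else if f.2.1 && f.2.2.1 then "혼성"
  else if !f.2.2.1 && !f.2.2.2 then "여성"
  else if !f.2.1 && !f.2.2.2 then "남성"
  else "기타"

-- ===== PRECONDITION & SPEC =====
def Spec_classify_gender (gender_list : List String) (out : String) : Prop := out = classify_gender_alt gender_list
instance (gender_list : List String) (out : String) : Decidable (Spec_classify_gender gender_list out) := by unfold Spec_classify_gender; infer_instance

-- ===== CLAIM (what is proved, stated in full; the proofs are below) =====
def Claim_equal_classify_gender : Prop := ∀ (gender_list : List String), Dom_classify_gender gender_list → Spec_classify_gender gender_list (classify_gender gender_list)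

-- ===== LEMMAS AND PROOFS =====

-- "unknown" predicate: an element that is none of the three known labels
def cgUnknown (g : String) : Bool := !(g == "OTHER" || g == "FEMALE" || g == "MALE")

theorem cgFlags_eq (l : List String) :
    cgFlags l = (l.contains "OTHER", l.contains "FEMALE", l.contains "MALE", l.any cgUnknown) := by
  suffices h : ∀ (a : Bool × Bool × Bool × Bool),
      l.foldl (fun (f : Bool × Bool × Bool × Bool) g =>
        if g == "OTHER" then (true, f.2.1, f.2.2.1, f.2.2.2)
        else if g == "FEMALE" then (f.1, true, f.2.2.1, f.2.2.2)
        else if g == "MALE" then (f.1, f.2.1, true, f.2.2.2)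
        else (f.1, f.2.1, f.2.2.1, true)) a
      = (a.1 || l.contains "OTHER", a.2.1 || l.contains "FEMALE",
         a.2.2.1 || l.contains "MALE", a.2.2.2 || l.any cgUnknown) by
    simpa [cgFlags] using h (false, false, false, false)
  induction l with
  | nil => intro a; simp
  | cons g t ih =>
    intro a
    rw [List.foldl_cons, ih]
    by_cases h1 : g = "OTHER"
    · simp [h1, cgUnknown]
    · have h1' : ("OTHER" : String) ≠ g := fun h => h1 h.symm
      by_cases h2 : g = "FEMALE"
      · simp [h2, cgUnknown]
      · have h2' : ("FEMALE" : String) ≠ g := fun h => h2 h.symm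
        by_cases h3 : g = "MALE"
        · simp [h3, cgUnknown]
        · have h3' : ("MALE" : String) ≠ g := fun h => h3 h.symm
          simp [h1, h2, h3, h1', h2', h3', cgUnknown, Bool.or_assoc]

theorem all_female_iff (l : List String) :
    l.all (fun g => g == "FEMALE")
      = (!l.contains "OTHER" && !l.contains "MALE" && !l.any cgUnknown) := by
  induction l with
  | nil => simp
  | cons g t ih =>
    by_cases h2 : g = "FEMALE"
    · simp [h2, ih, cgUnknown]
    · have h2' : ("FEMALE" : String) ≠ g := fun h => h2 h.symm
      by_cases h1 : g = "OTHER"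
      · simp [h1, cgUnknown]
      · have h1' : ("OTHER" : String) ≠ g := fun h => h1 h.symm
        by_cases h3 : g = "MALE"
        · simp [h3, cgUnknown]
        · have h3' : ("MALE" : String) ≠ g := fun h => h3 h.symm
          have e1 : (g == "OTHER") = false := by simp [h1]
          have e2 : (g == "FEMALE") = false := by simp [h2]
          have e3 : (g == "MALE") = false := by simp [h3]
          simp [e1, e2, e3, cgUnknown]

theorem all_male_iff (l : List String) :
    l.all (fun g => g == "MALE")
      = (!l.contains "OTHER" && !l.contains "FEMALE" && !l.any cgUnknown) := by
  induction l with
  | nil => simp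
  | cons g t ih =>
    by_cases h3 : g = "MALE"
    · simp [h3, ih, cgUnknown]
    · have h3' : ("MALE" : String) ≠ g := fun h => h3 h.symm
      by_cases h1 : g = "OTHER"
      · simp [h1, cgUnknown]
      · have h1' : ("OTHER" : String) ≠ g := fun h => h1 h.symm
        by_cases h2 : g = "FEMALE"
        · simp [h2, cgUnknown]
        · have h2' : ("FEMALE" : String) ≠ g := fun h => h2 h.symm
          have e1 : (g == "OTHER") = false := by simp [h1]
          have e2 : (g == "FEMALE") = false := by simp [h2]
          have e3 : (g == "MALE") = false := by simp [h3]
          simp [e1, e2, e3, cgUnknown]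

-- ===== VERDICT (by name: the statement is the Claim_ definition above) =====
theorem classify_gender_spec : Claim_equal_classify_gender := by
  intro l _
  unfold Spec_classify_gender classify_gender classify_gender_alt
  rw [cgFlags_eq]
  simp only [all_female_iff, all_male_iff]
  cases ho : l.contains "OTHER" <;>
    cases hf : l.contains "FEMALE" <;>
      cases hm : l.contains "MALE" <;>
        cases hu : l.any cgUnknown <;> simp
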